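-- pv_equiv track=rewrite | github.com/Wolfram18/Web-Site | AntiSite/controllers/lsa.py | compare_for_underline_canon
-- ===== SOURCE A (Python) =====
-- def _make_equal_words(source1, source2):
--     equal_words = []
--     for i in range(len(source1)):
--         if source1[i] in source2:
--             equal_words.append(source1[i])
--     return equal_words
--
-- def compare_for_underline_canon(canon_main_array, canon_cmp_array):
--     def get_string(source, equal_words):
--         result_str = ""
--         for word in source:
--             if word in equal_words:
--                 result_str += "<mark>" + word + "</mark> "
--             else:
--                 result_str += word + " "
--         return result_str
--
--     # при совпадении делаем <mark> для canon_main
--     equal_words_main = _make_equal_words(canon_main_array, canon_cmp_array)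
--     result_str_main = get_string(canon_main_array, equal_words_main)
--
--     # при совпадении делаем <mark> canon_cmp
--     equal_words_cmp = _make_equal_words(canon_cmp_array, canon_main_array)
--     result_str_cmp = get_string(canon_cmp_array, equal_words_cmp)
--
--     result = (result_str_main, result_str_cmp)
--
--     return result
-- ===== SOURCE B (Python) =====
-- def _merge_common(a, b):
--     # two-pointer merge intersection of two ascending lists
--     common = []
--     i = 0
--     j = 0
--     while i < len(a) and j < len(b):
--         if a[i] < b[j]:
--             i += 1
--         elif b[j] < a[i]:
--             j += 1
--         else:
--             common.append(a[i])
--             i += 1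
--             j += 1
--     return common
--
-- def compare_for_underline_canon(canon_main_array, canon_cmp_array):
--     common = _merge_common(sorted(canon_main_array), sorted(canon_cmp_array))
--
--     def mark(source):
--         pieces = []
--         for w in source:
--             if w in common:
--                 pieces.append("<mark>" + w + "</mark> ")
--             else:
--                 pieces.append(w + " ")
--         return "".join(pieces)
--
--     return (mark(canon_main_array), mark(canon_cmp_array))
-- ===== Notes on version B (the rewrite author's own statement) =====
-- stated objective: alternative
-- what changed: B computes the shared vocabulary once by sorting both lists and intersecting them with a two-pointer merge scan, then marks each array in one piece-collecting pass joined at the end, instead of A's per-direction filter pass plus string-accumulator loop with repeated linear membership scans of the other raw list.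
import Mathlib
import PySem

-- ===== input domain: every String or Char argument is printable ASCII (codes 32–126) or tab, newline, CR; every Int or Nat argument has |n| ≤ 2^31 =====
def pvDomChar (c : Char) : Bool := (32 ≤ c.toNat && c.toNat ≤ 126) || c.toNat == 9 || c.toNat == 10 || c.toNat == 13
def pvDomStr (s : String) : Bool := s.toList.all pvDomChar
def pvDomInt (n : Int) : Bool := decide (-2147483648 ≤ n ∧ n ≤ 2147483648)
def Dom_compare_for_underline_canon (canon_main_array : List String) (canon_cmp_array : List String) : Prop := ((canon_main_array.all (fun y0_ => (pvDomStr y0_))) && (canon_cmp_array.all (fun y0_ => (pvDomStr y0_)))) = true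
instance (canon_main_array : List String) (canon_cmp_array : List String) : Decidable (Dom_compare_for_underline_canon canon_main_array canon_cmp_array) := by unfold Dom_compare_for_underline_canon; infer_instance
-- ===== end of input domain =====

-- B builds the shared vocabulary once by sorting both lists and intersecting them with a
-- two-pointer merge scan, then marks each array in a single piece-collecting pass joined at
-- the end, replacing A's per-direction filter passes and string-accumulator loops; same values.
-- Python A returns a 2-tuple of strings; per the task signature both ports return it as a 2-element list.

-- ===== PORT A =====
-- _make_equal_words: filter source1 to the words also in source2 (append loop)
def pvMakeEqualWords (source1 source2 : List String) : List String :=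
  source1.foldl (fun acc w => if source2.contains w then acc ++ [w] else acc) []

-- get_string: accumulate "<mark>"+w+"</mark> " or w+" " over source
def pvGetString (source equal_words : List String) : String :=
  source.foldl
    (fun r w => if equal_words.contains w then r ++ ("<mark>" ++ w ++ "</mark> ") else r ++ (w ++ " "))
    ""

def compare_for_underline_canon (canon_main_array : List String) (canon_cmp_array : List String) : List String :=
  let equal_words_main := pvMakeEqualWords canon_main_array canon_cmp_array
  let result_str_main := pvGetString canon_main_array equal_words_main
  let equal_words_cmp := pvMakeEqualWords canon_cmp_array canon_main_array
  let result_str_cmp := pvGetString canon_cmp_array equal_words_cmp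
  [result_str_main, result_str_cmp]

-- ===== PORT B =====
-- _merge_common: two-pointer merge intersection of two ascending lists
def pvMergeCommon : List String → List String → List String
  | [], _ => []
  | _ :: _, [] => []
  | x :: xs, y :: ys =>
    if x < y then pvMergeCommon xs (y :: ys)
    else if y < x then pvMergeCommon (x :: xs) ys
    else x :: pvMergeCommon xs ys
  termination_by a b => a.length + b.length

-- mark: collect the pieces in a list, join at the end
def pvMark (common source : List String) : String :=
  String.join
    (source.foldl
      (fun pieces w =>
        if common.contains w then pieces ++ ["<mark>" ++ w ++ "</mark> "] else pieces ++ [w ++ " "])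
      [])

def compare_for_underline_canon_alt (canon_main_array : List String) (canon_cmp_array : List String) : List String :=
  let common := pvMergeCommon
    (PySem.List.sorted canon_main_array (fun x => x) false)
    (PySem.List.sorted canon_cmp_array (fun x => x) false)
  [pvMark common canon_main_array, pvMark common canon_cmp_array]

-- ===== PRECONDITION & SPEC =====
def Spec_compare_for_underline_canon (canon_main_array : List String) (canon_cmp_array : List String) (out : List String) : Prop := out = compare_for_underline_canon_alt canon_main_array canon_cmp_array
instance (canon_main_array : List String) (canon_cmp_array : List String) (out : List String) : Decidable (Spec_compare_for_underline_canon canon_main_array canon_cmp_array out) := by unfold Spec_compare_for_underline_canon; infer_instance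

-- ===== CLAIM (what is proved, stated in full; the proofs are below) =====
def Claim_equal_compare_for_underline_canon : Prop := ∀ (canon_main_array : List String) (canon_cmp_array : List String), Dom_compare_for_underline_canon canon_main_array canon_cmp_array → Spec_compare_for_underline_canon canon_main_array canon_cmp_array (compare_for_underline_canon canon_main_array canon_cmp_array)

-- ===== LEMMAS AND PROOFS =====

-- A's filtered list has exactly the words in both lists
theorem mem_pvMakeEqualWords (source1 source2 : List String) (w : String) :
    w ∈ pvMakeEqualWords source1 source2 ↔ w ∈ source1 ∧ w ∈ source2 := by
  unfold pvMakeEqualWords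
  rw [PySem.List.foldl_append_if_eq_filter]
  simp [List.mem_filter]

-- the merge intersection of two ascending lists holds exactly the words in both
theorem mem_pvMergeCommon (a b : List String)
    (ha : a.Pairwise (· ≤ ·)) (hb : b.Pairwise (· ≤ ·)) (w : String) :
    w ∈ pvMergeCommon a b ↔ w ∈ a ∧ w ∈ b := by
  fun_induction pvMergeCommon a b with
  | case1 b => simp
  | case2 x xs => simp
  | case3 x xs y ys hxy ih =>
    rw [ih ha.of_cons hb]
    constructor
    · rintro ⟨h1, h2⟩; exact ⟨List.mem_cons_of_mem _ h1, h2⟩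
    · rintro ⟨h1, h2⟩
      refine ⟨?_, h2⟩
      rcases List.mem_cons.1 h1 with rfl | h1'
      · exfalso
        rcases List.mem_cons.1 h2 with rfl | h2'
        · exact absurd hxy (lt_irrefl _)
        · have := (List.pairwise_cons.1 hb).1 w h2'
          exact absurd (lt_of_lt_of_le hxy this) (lt_irrefl _)
      · exact h1'
  | case4 x xs y ys hxy hyx ih =>
    rw [ih ha hb.of_cons]
    constructor
    · rintro ⟨h1, h2⟩; exact ⟨h1, List.mem_cons_of_mem _ h2⟩
    · rintro ⟨h1, h2⟩
      refine ⟨h1, ?_⟩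
      rcases List.mem_cons.1 h2 with rfl | h2'
      · exfalso
        rcases List.mem_cons.1 h1 with rfl | h1'
        · exact absurd hyx (lt_irrefl _)
        · have := (List.pairwise_cons.1 ha).1 w h1'
          exact absurd (lt_of_lt_of_le hyx this) (lt_irrefl _)
      · exact h2'
  | case5 x xs y ys hxy hyx ih =>
    have hxey : x = y := le_antisymm (not_lt.1 hyx) (not_lt.1 hxy)
    subst hxey
    rw [List.mem_cons, ih ha.of_cons hb.of_cons]
    constructor
    · rintro (rfl | ⟨h1, h2⟩)
      · exact ⟨List.mem_cons_self, List.mem_cons_self⟩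
      · exact ⟨List.mem_cons_of_mem _ h1, List.mem_cons_of_mem _ h2⟩
    · rintro ⟨h1, h2⟩
      by_cases hw : w = x
      · exact Or.inl hw
      · refine Or.inr ⟨?_, ?_⟩
        · rcases List.mem_cons.1 h1 with rfl | h1' <;> [exact absurd rfl hw; exact h1']
        · rcases List.mem_cons.1 h2 with rfl | h2' <;> [exact absurd rfl hw; exact h2']

-- a piece-collecting foldl with a branch is the map of the branched piece function
theorem foldl_pieces_eq_map (c : String → Bool) (t e : String → String) (l : List String) (acc : List String) :
    l.foldl (fun pieces w => if c w then pieces ++ [t w] else pieces ++ [e w]) acc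
      = acc ++ l.map (fun w => if c w then t w else e w) := by
  induction l generalizing acc with
  | nil => simp
  | cons x tl ih =>
    rw [List.foldl_cons, List.map_cons]
    split_ifs with hc <;> rw [ih] <;> simp

-- a String foldl-append with a seed pulls the seed out front
theorem str_foldl_acc (l : List String) (acc : String) :
    l.foldl (fun r s => r ++ s) acc = acc ++ l.foldl (fun r s => r ++ s) "" := by
  induction l generalizing acc with
  | nil => simp
  | cons x t ih =>
    rw [List.foldl_cons, List.foldl_cons, ih (acc ++ x), ih ("" ++ x)]
    simp [String.append_assoc]

-- String.join distributes over cons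
theorem str_join_cons (a : String) (l : List String) :
    String.join (a :: l) = a ++ String.join l := by
  show (a :: l).foldl (fun r s => r ++ s) "" = a ++ l.foldl (fun r s => r ++ s) ""
  rw [List.foldl_cons, str_foldl_acc l ("" ++ a)]
  simp

-- the accumulator loop of get_string is the join of the mapped pieces
theorem foldl_str_eq_join (g : String → String) (l : List String) (acc : String) :
    l.foldl (fun r w => r ++ g w) acc = acc ++ String.join (l.map g) := by
  induction l generalizing acc with
  | nil => simp [String.join]
  | cons x t ih => rw [List.foldl_cons, ih, List.map_cons, str_join_cons, String.append_assoc]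

-- pvGetString equals pvMark whenever the two membership tests agree on the source's words
theorem getString_eq_mark (source equal_words common : List String)
    (h : ∀ w ∈ source, (equal_words.contains w) = (common.contains w)) :
    pvGetString source equal_words = pvMark common source := by
  unfold pvGetString pvMark
  rw [foldl_pieces_eq_map (fun w => common.contains w) (fun w => "<mark>" ++ w ++ "</mark> ") (fun w => w ++ " ") source []]
  have hc : source.foldl
      (fun r w => if equal_words.contains w then r ++ ("<mark>" ++ w ++ "</mark> ") else r ++ (w ++ " ")) ""
      = source.foldl
      (fun r w => r ++ (if common.contains w then "<mark>" ++ w ++ "</mark> " else w ++ " ")) "" := by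
    apply PySem.List.foldl_congr_mem
    intro acc w hw
    rw [← h w hw]
    split_ifs <;> rfl
  rw [hc, foldl_str_eq_join]
  simp

-- membership agreement between A's filtered list and B's merged intersection
theorem contains_agree (main cmp : List String) (w : String) :
    ((pvMakeEqualWords main cmp).contains w)
      = ((pvMergeCommon (PySem.List.sorted main (fun x => x) false)
          (PySem.List.sorted cmp (fun x => x) false)).contains w) := by
  rw [Bool.eq_iff_iff]
  simp only [List.contains_iff_mem]
  rw [mem_pvMakeEqualWords,
    mem_pvMergeCommon _ _ (PySem.List.sorted_pairwise main (fun x => x))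
      (PySem.List.sorted_pairwise cmp (fun x => x)) w,
    PySem.List.mem_sorted, PySem.List.mem_sorted]

-- ===== VERDICT (by name: the statement is the Claim_ definition above) =====
theorem compare_for_underline_canon_spec : Claim_equal_compare_for_underline_canon := by
  intro main cmp _
  unfold Spec_compare_for_underline_canon compare_for_underline_canon compare_for_underline_canon_alt
  show [pvGetString main (pvMakeEqualWords main cmp), pvGetString cmp (pvMakeEqualWords cmp main)]
      = [pvMark (pvMergeCommon (PySem.List.sorted main (fun x => x) false)
            (PySem.List.sorted cmp (fun x => x) false)) main,
         pvMark (pvMergeCommon (PySem.List.sorted main (fun x => x) false)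
            (PySem.List.sorted cmp (fun x => x) false)) cmp]
  rw [getString_eq_mark _ _ _ (fun w _ => contains_agree main cmp w),
    getString_eq_mark _ _ _ (fun w _ => ?_)]
  rw [Bool.eq_iff_iff]
  simp only [List.contains_iff_mem]
  rw [mem_pvMakeEqualWords,
    mem_pvMergeCommon _ _ (PySem.List.sorted_pairwise main (fun x => x))
      (PySem.List.sorted_pairwise cmp (fun x => x)) w,
    PySem.List.mem_sorted, PySem.List.mem_sorted]
  tauto
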